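-- pv_equiv track=rewrite | github.com/AruJoy/algorithm-study | 백준/Gold/20327. 배열 돌리기 6/배열 돌리기 6.py | act_5
-- ===== SOURCE A (Python) =====
-- def act_5(scale, matrix, s_scale):
--     new_matrix = [row[:] for row in matrix]
--     repeat = scale//s_scale
--     for i in range(repeat):
--         for j in range(repeat):
--             for dy in range(s_scale):
--                 for dx in range(s_scale):
--                     new_matrix[i*s_scale+dy][j*s_scale+dx] = matrix[(repeat-1-i)*s_scale+dy][j*s_scale+dx]
--     return new_matrix
-- ===== SOURCE B (Python) =====
-- def act_5(scale, matrix, s_scale):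
--     # One-dimensional block-row permutation: copy whole row prefixes with slices
--     # instead of the element-by-element 4-level loop.
--     new_matrix = [row[:] for row in matrix]
--     repeat = scale // s_scale
--     if repeat > 0 and s_scale > 0:
--         span = repeat * s_scale
--         for r in range(span):
--             i, dy = divmod(r, s_scale)
--             src = (repeat - 1 - i) * s_scale + dy
--             new_matrix[r][:span] = matrix[src][:span]
--     return new_matrix
-- ===== Notes on version B (the rewrite author's own statement) =====
-- stated objective: simpler
-- what changed: A's 4-level element-by-element loop nest is reframed as a one-dimensional permutation of block rows: for each destination row r below span = (scale//s_scale)*s_scale, B computes the source row with one divmod and copies the first span columns with a single slice assignment.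
import Mathlib
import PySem

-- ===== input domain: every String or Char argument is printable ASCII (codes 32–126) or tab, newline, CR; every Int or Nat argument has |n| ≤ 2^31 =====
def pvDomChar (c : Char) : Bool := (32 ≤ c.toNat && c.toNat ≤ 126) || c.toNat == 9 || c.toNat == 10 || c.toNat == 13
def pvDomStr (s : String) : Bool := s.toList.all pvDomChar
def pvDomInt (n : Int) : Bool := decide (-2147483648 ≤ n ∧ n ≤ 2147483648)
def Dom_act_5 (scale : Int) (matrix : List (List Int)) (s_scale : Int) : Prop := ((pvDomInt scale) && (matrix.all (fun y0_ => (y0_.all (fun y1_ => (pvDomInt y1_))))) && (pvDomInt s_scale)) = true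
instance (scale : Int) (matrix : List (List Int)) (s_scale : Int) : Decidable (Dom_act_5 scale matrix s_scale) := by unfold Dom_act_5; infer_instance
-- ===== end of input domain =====

-- B rewrites A's element-by-element 4-level loop as a one-dimensional block-row
-- permutation that copies whole row prefixes with slices (objective: simpler).

-- ===== PORT A =====
-- helper for "new_matrix[r][c] = v"; inside A's loops r and c are always nonnegative
-- (i, j, dy, dx ≥ 0 and s_scale ≥ 1 whenever the body runs), so .toNat is exact.
def pvSetAt (nm : List (List Int)) (r c : Int) (v : Int) : List (List Int) :=
  nm.modify r.toNat (fun row => row.set c.toNat v)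

-- matrix reads use pyGetD; the defaults are never reached on inputs satisfying Pre_act_5
-- (exactly the inputs where Python's indexing does not raise).
def act_5 (scale : Int) (matrix : List (List Int)) (s_scale : Int) : List (List Int) :=
  -- new_matrix = [row[:] for row in matrix]  (a copy: as a pure value, the list itself)
  let rep : Int := PySem.Int.floordiv scale s_scale
  (PySem.List.pyRange 0 rep 1).foldl (fun nm i =>
    (PySem.List.pyRange 0 rep 1).foldl (fun nm j =>
      (PySem.List.pyRange 0 s_scale 1).foldl (fun nm dy =>
        (PySem.List.pyRange 0 s_scale 1).foldl (fun nm dx =>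
          pvSetAt nm (i * s_scale + dy) (j * s_scale + dx)
            (PySem.List.pyGetD
              (PySem.List.pyGetD matrix ((rep - 1 - i) * s_scale + dy) [])
              (j * s_scale + dx) 0))
          nm) nm) nm) matrix

-- ===== PORT B =====
def act_5_alt (scale : Int) (matrix : List (List Int)) (s_scale : Int) : List (List Int) :=
  let rep : Int := PySem.Int.floordiv scale s_scale
  if 0 < rep ∧ 0 < s_scale then
    let span : Int := rep * s_scale
    (PySem.List.pyRange 0 span 1).foldl (fun nm r =>
      let i : Int := PySem.Int.floordiv r s_scale
      let dy : Int := PySem.Int.mod r s_scale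
      let src : Int := (rep - 1 - i) * s_scale + dy
      -- new_matrix[r][:span] = matrix[src][:span]
      nm.modify r.toNat (fun row =>
        PySem.List.slice (PySem.List.pyGetD matrix src []) none (some span) ++
          row.drop span.toNat)) matrix
  else matrix

-- ===== PRECONDITION & SPEC =====
-- Pre_ excludes exactly the inputs on which A raises: s_scale = 0 (ZeroDivisionError in
-- scale//s_scale) and, when the loops do run (s_scale ≥ 1 and repeat ≥ 1), matrices whose
-- touched region is incomplete (fewer than repeat*s_scale rows, or a touched row shorter
-- than repeat*s_scale columns — IndexError).
def Pre_act_5 (scale : Int) (matrix : List (List Int)) (s_scale : Int) : Prop :=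
  s_scale ≠ 0 ∧
  (0 < s_scale → 0 < PySem.Int.floordiv scale s_scale →
    (PySem.Int.floordiv scale s_scale * s_scale ≤ (matrix.length : Int) ∧
     ∀ row ∈ matrix.take (PySem.Int.floordiv scale s_scale * s_scale).toNat,
       PySem.Int.floordiv scale s_scale * s_scale ≤ (row.length : Int)))
instance (scale : Int) (matrix : List (List Int)) (s_scale : Int) : Decidable (Pre_act_5 scale matrix s_scale) := by unfold Pre_act_5; infer_instance

def pvWitness_act_5 : Int × List (List Int) × Int :=
  (4, [[1, 2, 3, 4], [5, 6, 7, 8], [9, 10, 11, 12], [13, 14, 15, 16]], 2)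

def Spec_act_5 (scale : Int) (matrix : List (List Int)) (s_scale : Int) (out : List (List Int)) : Prop := out = act_5_alt scale matrix s_scale
instance (scale : Int) (matrix : List (List Int)) (s_scale : Int) (out : List (List Int)) : Decidable (Spec_act_5 scale matrix s_scale out) := by unfold Spec_act_5; infer_instance

-- ===== CLAIM (what is proved, stated in full; the proofs are below) =====
def Claim_equal_act_5 : Prop := ∀ (scale : Int) (matrix : List (List Int)) (s_scale : Int), Dom_act_5 scale matrix s_scale → Pre_act_5 scale matrix s_scale → Spec_act_5 scale matrix s_scale (act_5 scale matrix s_scale)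

-- ===== LEMMAS AND PROOFS =====

-- one (r, c) cell of a matrix, as an Option
def pvCell (nm : List (List Int)) (r c : Nat) : Option Int := nm[r]?.bind (fun row => row[c]?)

-- A's write list, flattened, and the value written at each position
def pvW (rep s : Int) : List (Int × Int × Int × Int) :=
  (PySem.List.pyRange 0 rep 1).flatMap (fun i =>
    (PySem.List.pyRange 0 rep 1).flatMap (fun j =>
      (PySem.List.pyRange 0 s 1).flatMap (fun dy =>
        (PySem.List.pyRange 0 s 1).map (fun dx => (i, j, dy, dx)))))

def pvVal (matrix : List (List Int)) (rep s : Int) (q : Int × Int × Int × Int) : Int :=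
  PySem.List.pyGetD (PySem.List.pyGetD matrix ((rep - 1 - q.1) * s + q.2.2.1) []) (q.2.1 * s + q.2.2.2) 0

-- B's per-row transformation
def pvGB (matrix : List (List Int)) (rep s : Int) (x : Int) (row : List Int) : List Int :=
  PySem.List.slice
    (PySem.List.pyGetD matrix ((rep - 1 - PySem.Int.floordiv x s) * s + PySem.Int.mod x s) [])
    none (some (rep * s)) ++ row.drop (rep * s).toNat

theorem pvShape_pvSetAt (nm : List (List Int)) (r c : Int) (v : Int) :
    (pvSetAt nm r c v).map List.length = nm.map List.length := by
  apply List.ext_getElem?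
  intro i
  simp only [List.getElem?_map]
  unfold pvSetAt
  rw [List.getElem?_modify]
  cases h : nm[i]? with
  | none => rfl
  | some row => by_cases hr : r.toNat = i <;> simp [hr]

theorem pvShape_foldl {α : Type} (L : List α) (R C V : α → Int) (nm : List (List Int)) :
    ((L.foldl (fun nm x => pvSetAt nm (R x) (C x) (V x)) nm).map List.length) = nm.map List.length := by
  induction L generalizing nm with
  | nil => rfl
  | cons a L ih => simp only [List.foldl_cons]; rw [ih, pvShape_pvSetAt]

theorem pvCell_pvSetAt (nm : List (List Int)) (r c : Int) (v : Int) (r' c' : Nat) :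
    pvCell (pvSetAt nm r c v) r' c' =
      if r.toNat = r' ∧ c.toNat = c' then (pvCell nm r' c').map (fun _ => v)
      else pvCell nm r' c' := by
  unfold pvCell pvSetAt
  rw [List.getElem?_modify]
  cases h : nm[r']? with
  | none => simp
  | some row =>
    by_cases hr : r.toNat = r'
    · by_cases hc : c.toNat = c'
      · subst hc
        simp only [hr, if_pos rfl, Option.map_some, Option.bind_some, true_and,
          List.getElem?_set, if_pos rfl]
        cases h2 : row[c.toNat]? with
        | none =>
          have := List.getElem?_eq_none_iff.mp h2
          simp [Nat.not_lt.mpr this]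
        | some w =>
          have : c.toNat < row.length := by
            by_contra hle
            rw [List.getElem?_eq_none_iff.mpr (Nat.not_lt.mp hle)] at h2; cases h2
          simp [this]
      · simp [hr, hc, List.getElem?_set]
    · simp [hr]

theorem pvCell_foldl {α : Type} (L : List α) (R C V : α → Int) (nm : List (List Int)) (r c : Nat) :
    pvCell (L.foldl (fun nm x => pvSetAt nm (R x) (C x) (V x)) nm) r c =
      match L.reverse.find? (fun x => (R x).toNat == r && (C x).toNat == c) with
      | some x => (pvCell nm r c).map (fun _ => V x)
      | none => pvCell nm r c := by
  induction L using List.reverseRecOn with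
  | nil => rfl
  | append_singleton L a ih =>
    rw [List.foldl_append, List.foldl_cons, List.foldl_nil, pvCell_pvSetAt,
      List.reverse_append]
    simp only [List.reverse_cons, List.reverse_nil, List.nil_append, List.cons_append,
      List.find?_cons]
    by_cases h : ((R a).toNat == r && (C a).toNat == c) = true
    · have hp : (R a).toNat = r ∧ (C a).toNat = c := by
        simpa using h
      rw [if_pos hp, h, ih]
      cases hf : L.reverse.find? (fun x => (R x).toNat == r && (C x).toNat == c) <;>
        cases pvCell nm r c <;> rfl
    · have hp : ¬((R a).toNat = r ∧ (C a).toNat = c) := by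
        simpa using h
      rw [if_neg hp]
      simp only [h]
      exact ih

theorem pvRow_foldl_not_touched (L : List Int) (g : Int → List Int → List Int)
    (nm : List (List Int)) (r : Nat) (h : ∀ y ∈ L, y.toNat ≠ r) :
    (L.foldl (fun nm x => nm.modify x.toNat (g x)) nm)[r]? = nm[r]? := by
  induction L generalizing nm with
  | nil => rfl
  | cons a L ih =>
    rw [List.foldl_cons, ih _ (fun y hy => h y (List.mem_cons_of_mem _ hy)),
      List.getElem?_modify]
    have := h a (List.mem_cons_self)
    cases nm[r]? <;> simp [this]

theorem pvRow_foldl (L : List Int) (g : Int → List Int → List Int)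
    (nm : List (List Int)) (r : Nat) (hnd : (L.map Int.toNat).Nodup) :
    (L.foldl (fun nm x => nm.modify x.toNat (g x)) nm)[r]? =
      match L.find? (fun x => x.toNat == r) with
      | some x => (nm[r]?).map (g x)
      | none => nm[r]? := by
  induction L generalizing nm with
  | nil => rfl
  | cons a L ih =>
    rw [List.foldl_cons, List.find?_cons]
    simp only [List.map_cons, List.nodup_cons] at hnd
    by_cases h : (a.toNat == r) = true
    · have har : a.toNat = r := by simpa using h
      rw [h]
      rw [pvRow_foldl_not_touched L g _ r (fun y hy hyr => hnd.1 (by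
        have hm := List.mem_map_of_mem (f := Int.toNat) hy
        rw [hyr] at hm; rw [har]; exact hm))]
      rw [List.getElem?_modify, har]
      cases nm[r]? <;> simp
    · simp only [Bool.not_eq_true] at h
      rw [h, ih _ hnd.2, List.getElem?_modify]
      have : a.toNat ≠ r := by simpa using h
      cases hf : L.find? (fun x => x.toNat == r) <;> cases nm[r]? <;> simp [this]
theorem pvFoldl_flatMap {α β γ : Type} (l : List α) (f : α → List β) (g : γ → β → γ) (x : γ) :
    (l.flatMap f).foldl g x = l.foldl (fun acc a => (f a).foldl g acc) x := by
  induction l generalizing x with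
  | nil => rfl
  | cons a l ih => simp [List.foldl_append, ih]

theorem act5_flat (scale : Int) (matrix : List (List Int)) (s : Int) :
    act_5 scale matrix s =
      (pvW (PySem.Int.floordiv scale s) s).foldl
        (fun nm q => pvSetAt nm (q.1 * s + q.2.2.1) (q.2.1 * s + q.2.2.2)
          (pvVal matrix (PySem.Int.floordiv scale s) s q)) matrix := by
  rw [pvW, pvFoldl_flatMap]
  simp only [pvFoldl_flatMap, List.foldl_map]
  rfl

theorem mem_pvW {rep s : Int} {q : Int × Int × Int × Int} :
    q ∈ pvW rep s ↔ (0 ≤ q.1 ∧ q.1 < rep) ∧ (0 ≤ q.2.1 ∧ q.2.1 < rep) ∧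
      (0 ≤ q.2.2.1 ∧ q.2.2.1 < s) ∧ (0 ≤ q.2.2.2 ∧ q.2.2.2 < s) := by
  obtain ⟨i, j, dy, dx⟩ := q
  simp [pvW, List.mem_flatMap, PySem.List.mem_pyRange_one]

theorem cellA_ge (scale : Int) (matrix : List (List Int)) (s : Int) (hs : 0 < s)
    (r c : Nat) (h : ¬(r < (PySem.Int.floordiv scale s * s).toNat ∧ c < (PySem.Int.floordiv scale s * s).toNat)) :
    pvCell (act_5 scale matrix s) r c = pvCell matrix r c := by
  set rep := PySem.Int.floordiv scale s with hrep
  rw [act5_flat, pvCell_foldl]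
  have hnone : (pvW rep s).reverse.find?
      (fun q => (q.1 * s + q.2.2.1).toNat == r && (q.2.1 * s + q.2.2.2).toNat == c) = none := by
    rw [List.find?_eq_none]
    intro q hq
    rw [List.mem_reverse] at hq
    obtain ⟨⟨hi0, hi1⟩, ⟨hj0, hj1⟩, ⟨hdy0, hdy1⟩, ⟨hdx0, hdx1⟩⟩ := mem_pvW.mp hq
    intro hp
    simp only [Bool.and_eq_true, beq_iff_eq] at hp
    have e1 : (q.1 : Int) * s ≤ (rep - 1) * s :=
      mul_le_mul_of_nonneg_right (by omega) (le_of_lt hs)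
    have e2 : (q.2.1 : Int) * s ≤ (rep - 1) * s :=
      mul_le_mul_of_nonneg_right (by omega) (le_of_lt hs)
    have e3 : (rep - 1) * s = rep * s - s := by ring
    have e4 : 0 ≤ q.1 * s := mul_nonneg hi0 (le_of_lt hs)
    have e5 : 0 ≤ q.2.1 * s := mul_nonneg hj0 (le_of_lt hs)
    omega
  rw [hnone]

theorem cellA_lt (scale : Int) (matrix : List (List Int)) (s : Int) (hs : 0 < s)
    (r c : Nat) (hr : r < (PySem.Int.floordiv scale s * s).toNat)
    (hc : c < (PySem.Int.floordiv scale s * s).toNat) :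
    pvCell (act_5 scale matrix s) r c =
      (pvCell matrix r c).map (fun _ =>
        PySem.List.pyGetD
          (PySem.List.pyGetD matrix
            ((PySem.Int.floordiv scale s - 1 - (r : Int) / s) * s + (r : Int) % s) [])
          (c : Int) 0) := by
  set rep := PySem.Int.floordiv scale s with hrepdef
  have hspan : 0 < rep * s ∧ (r : Int) < rep * s ∧ (c : Int) < rep * s := by omega
  have hrep : 0 < rep := by nlinarith [hspan.1]
  rw [act5_flat, pvCell_foldl]
  -- the predicate
  set p := (fun q : Int × Int × Int × Int =>
    (q.1 * s + q.2.2.1).toNat == r && (q.2.1 * s + q.2.2.2).toNat == c) with hp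
  -- existence: the canonical witness is in the list
  have hmem : ((r : Int) / s, (c : Int) / s, (r : Int) % s, (c : Int) % s) ∈ (pvW rep s).reverse := by
    rw [List.mem_reverse, mem_pvW]
    refine ⟨⟨Int.ediv_nonneg (by omega) (le_of_lt hs), ?_⟩,
      ⟨Int.ediv_nonneg (by omega) (le_of_lt hs), ?_⟩,
      ⟨Int.emod_nonneg _ (by omega), Int.emod_lt_of_pos _ hs⟩,
      ⟨Int.emod_nonneg _ (by omega), Int.emod_lt_of_pos _ hs⟩⟩
    · exact (Int.ediv_lt_iff_lt_mul hs).mpr hspan.2.1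
    · exact (Int.ediv_lt_iff_lt_mul hs).mpr hspan.2.2
  have hpw : p ((r : Int) / s, (c : Int) / s, (r : Int) % s, (c : Int) % s) = true := by
    have h1 : (r : Int) / s * s + (r : Int) % s = (r : Int) := by
      have := Int.ediv_add_emod (r : Int) s; linarith
    have h2 : (c : Int) / s * s + (c : Int) % s = (c : Int) := by
      have := Int.ediv_add_emod (c : Int) s; linarith
    simp only [hp, h1, h2, Int.toNat_natCast, beq_self_eq_true, Bool.and_self]
  have hsome : ((pvW rep s).reverse.find? p).isSome := List.find?_isSome.mpr ⟨_, hmem, hpw⟩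
  obtain ⟨x, hfind⟩ := Option.isSome_iff_exists.mp hsome
  have hpx := List.find?_some hfind
  have hxmem := List.mem_of_find?_eq_some hfind
  rw [List.mem_reverse] at hxmem
  obtain ⟨⟨hi0, hi1⟩, ⟨hj0, hj1⟩, ⟨hdy0, hdy1⟩, ⟨hdx0, hdx1⟩⟩ := mem_pvW.mp hxmem
  simp only [hp, Bool.and_eq_true, beq_iff_eq] at hpx
  have hnn1 : 0 ≤ x.1 * s := mul_nonneg hi0 (le_of_lt hs)
  have hnn2 : 0 ≤ x.2.1 * s := mul_nonneg hj0 (le_of_lt hs)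
  have hx1 : x.1 * s + x.2.2.1 = (r : Int) := by omega
  have hx2 : x.2.1 * s + x.2.2.2 = (c : Int) := by omega
  have hdiv1 : (r : Int) / s = x.1 ∧ (r : Int) % s = x.2.2.1 :=
    (Int.ediv_emod_unique hs).mpr ⟨by linarith, hdy0, hdy1⟩
  rw [hfind]
  show Option.map (fun _ => pvVal matrix rep s x) (pvCell matrix r c) = _
  congr 1
  funext y
  simp only [pvVal]
  rw [hx2, ← hdiv1.1, ← hdiv1.2]

theorem rowB (scale : Int) (matrix : List (List Int)) (s : Int)
    (hguard : 0 < PySem.Int.floordiv scale s ∧ 0 < s) (r : Nat) :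
    (act_5_alt scale matrix s)[r]? =
      if r < (PySem.Int.floordiv scale s * s).toNat then
        (matrix[r]?).map (pvGB matrix (PySem.Int.floordiv scale s) s (r : Int))
      else matrix[r]? := by
  set rep := PySem.Int.floordiv scale s with hrepdef
  obtain ⟨hrep, hs⟩ := hguard
  have halt : act_5_alt scale matrix s =
      (PySem.List.pyRange 0 (rep * s) 1).foldl
        (fun nm x => nm.modify x.toNat (pvGB matrix rep s x)) matrix := by
    unfold act_5_alt
    rw [← hrepdef, if_pos ⟨hrep, hs⟩]
    rfl
  rw [halt]
  have hnd : ((PySem.List.pyRange 0 (rep * s) 1).map Int.toNat).Nodup := by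
    refine List.Nodup.map_on ?_ (PySem.List.nodup_pyRange_one 0 (rep * s))
    intro x hx y hy hxy
    rw [PySem.List.mem_pyRange_one] at hx hy
    omega
  rw [pvRow_foldl _ _ _ _ hnd]
  by_cases hrlt : r < (rep * s).toNat
  · have hsome : ((PySem.List.pyRange 0 (rep * s) 1).find? (fun x => x.toNat == r)).isSome := by
      rw [List.find?_isSome]
      exact ⟨(r : Int), PySem.List.mem_pyRange_one.mpr (by omega), by simp⟩
    obtain ⟨x, hfind⟩ := Option.isSome_iff_exists.mp hsome
    have hpx := List.find?_some hfind
    have hxmem := PySem.List.mem_pyRange_one.mp (List.mem_of_find?_eq_some hfind)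
    simp only [beq_iff_eq] at hpx
    have hxr : x = (r : Int) := by omega
    rw [hfind, if_pos hrlt, hxr]
  · have hnone : (PySem.List.pyRange 0 (rep * s) 1).find? (fun x => x.toNat == r) = none := by
      rw [List.find?_eq_none]
      intro x hx
      rw [PySem.List.mem_pyRange_one] at hx
      simp only [beq_iff_eq]
      omega
    rw [hnone, if_neg hrlt]

theorem rowlenA (scale : Int) (matrix : List (List Int)) (s : Int) (k : Nat) :
    (act_5 scale matrix s)[k]?.map List.length = matrix[k]?.map List.length := by
  rw [act5_flat]
  have h := pvShape_foldl (pvW (PySem.Int.floordiv scale s) s)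
    (fun q => q.1 * s + q.2.2.1) (fun q => q.2.1 * s + q.2.2.2)
    (pvVal matrix (PySem.Int.floordiv scale s) s) matrix
  have h2 := congrArg (fun l => l[k]?) h
  simpa [List.getElem?_map] using h2

theorem act5_rep_nonpos (scale : Int) (matrix : List (List Int)) (s : Int)
    (h : PySem.Int.floordiv scale s ≤ 0) : act_5 scale matrix s = matrix := by
  rw [act5_flat]
  have : pvW (PySem.Int.floordiv scale s) s = [] := by
    simp [pvW, PySem.List.pyRange_one_eq_nil h]
  rw [this]; rfl

theorem act5_s_nonpos (scale : Int) (matrix : List (List Int)) (s : Int)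
    (h : s ≤ 0) : act_5 scale matrix s = matrix := by
  rw [act5_flat]
  have : pvW (PySem.Int.floordiv scale s) s = [] := by
    simp [pvW, PySem.List.pyRange_one_eq_nil h]
  rw [this]; rfl

theorem main_eq (scale : Int) (matrix : List (List Int)) (s : Int) (hs0 : s ≠ 0)
    (hbound : 0 < s → 0 < PySem.Int.floordiv scale s →
      (PySem.Int.floordiv scale s * s ≤ (matrix.length : Int) ∧
       ∀ row ∈ matrix.take (PySem.Int.floordiv scale s * s).toNat,
         PySem.Int.floordiv scale s * s ≤ (row.length : Int))) :
    act_5 scale matrix s = act_5_alt scale matrix s := by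
  set rep := PySem.Int.floordiv scale s with hrepdef
  by_cases hg : 0 < rep ∧ 0 < s
  · obtain ⟨hrep, hs⟩ := hg
    obtain ⟨hlen, hrows⟩ := hbound hs hrep
    have hspan0 : 0 < rep * s := mul_pos hrep hs
    have hmemtake : ∀ (k : Nat) (hk1 : k < (rep * s).toNat) (hk2 : k < matrix.length),
        rep * s ≤ (matrix[k]'hk2 |>.length : Int) := by
      intro k hk hk2
      have hkt : k < (matrix.take (rep * s).toNat).length := by
        simp [List.length_take]; omega
      have hmem := List.getElem_mem hkt
      rw [List.getElem_take] at hmem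
      exact hrows _ hmem
    apply List.ext_getElem?
    intro r
    rw [rowB scale matrix s ⟨hrep, hs⟩ r]
    by_cases hrlt : r < (rep * s).toNat
    · rw [if_pos hrlt]
      have hrlen : r < matrix.length := by omega
      have hrow0 : matrix[r]? = some (matrix[r]'hrlen) := List.getElem?_eq_getElem hrlen
      obtain ⟨rowA, hrowA⟩ : ∃ rowA, (act_5 scale matrix s)[r]? = some rowA := by
        have h := rowlenA scale matrix s r
        rw [hrow0] at h
        cases hA : (act_5 scale matrix s)[r]? with
        | none => rw [hA] at h; simp at h
        | some rowA => exact ⟨rowA, rfl⟩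
      rw [hrowA, hrow0, Option.map_some]
      congr 1
      -- abbreviations
      have hrow0len : rep * s ≤ ((matrix[r]'hrlen).length : Int) := hmemtake r hrlt hrlen
      have hdiv0 : 0 ≤ (r : Int) / s := Int.ediv_nonneg (by omega) (le_of_lt hs)
      have hdivlt : (r : Int) / s < rep := (Int.ediv_lt_iff_lt_mul hs).mpr (by omega)
      have hm0 : 0 ≤ (r : Int) % s := Int.emod_nonneg _ hs0
      have hmlt : (r : Int) % s < s := Int.emod_lt_of_pos _ hs
      have e1 : (rep - 1 - (r : Int) / s) * s ≤ (rep - 1) * s :=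
        mul_le_mul_of_nonneg_right (by omega) (le_of_lt hs)
      have e2 : 0 ≤ (rep - 1 - (r : Int) / s) * s := mul_nonneg (by omega) (le_of_lt hs)
      have e3 : (rep - 1) * s = rep * s - s := by ring
      set q : Int := (rep - 1 - (r : Int) / s) * s + (r : Int) % s with hq
      have hsrc0 : 0 ≤ q := by omega
      have hsrclt : q < rep * s := by omega
      have hsrclen : q.toNat < matrix.length := by omega
      have hsrcrowlen : rep * s ≤ ((matrix[q.toNat]'hsrclen).length : Int) :=
        hmemtake q.toNat (by omega) hsrclen
      have hgb : pvGB matrix rep s (r : Int) (matrix[r]'hrlen) =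
          (matrix[q.toNat]'hsrclen).take (rep * s).toNat ++
            (matrix[r]'hrlen).drop (rep * s).toNat := by
        unfold pvGB
        rw [PySem.Int.floordiv_eq_ediv_of_pos hs, PySem.Int.mod_eq_emod_of_pos hs, ← hq,
          PySem.List.pyGetD_eq_getElem matrix [] hsrc0 (by omega),
          PySem.List.slice_to _ (le_of_lt hspan0)]
      rw [hgb]
      have hcell : ∀ c : Nat, rowA[c]? = pvCell (act_5 scale matrix s) r c := by
        intro c; simp [pvCell, hrowA]
      have htklen : ((matrix[q.toNat]'hsrclen).take (rep * s).toNat).length = (rep * s).toNat := by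
        simp [List.length_take]; omega
      apply List.ext_getElem?
      intro c
      by_cases hclt : c < (rep * s).toNat
      · rw [hcell c, cellA_lt scale matrix s hs r c hrlt hclt]
        have hcr : c < (matrix[r]'hrlen).length := by omega
        have hcs : c < (matrix[q.toNat]'hsrclen).length := by omega
        have hpc : pvCell matrix r c = some ((matrix[r]'hrlen)[c]'hcr) := by
          simp [pvCell, hrow0, List.getElem?_eq_getElem hcr]
        rw [hpc, Option.map_some, ← hrepdef, ← hq,
          PySem.List.pyGetD_eq_getElem matrix [] hsrc0 (by omega),
          PySem.List.pyGetD_eq_getElem _ 0 (by omega) (by exact_mod_cast by omega)]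
        rw [List.getElem?_append, htklen, if_pos hclt, List.getElem?_take, if_pos hclt,
          List.getElem?_eq_getElem hcs]
        simp
      · rw [hcell c, cellA_ge scale matrix s hs r c (by rw [← hrepdef]; omega)]
        rw [List.getElem?_append, htklen, if_neg hclt, List.getElem?_drop]
        have : (rep * s).toNat + (c - (rep * s).toNat) = c := by omega
        rw [this]
        simp [pvCell, hrow0]
    · rw [if_neg hrlt]
      have h := rowlenA scale matrix s r
      cases hM : matrix[r]? with
      | none =>
        rw [hM] at h
        cases hA : (act_5 scale matrix s)[r]? with
        | none => rfl
        | some rowA => rw [hA] at h; simp at h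
      | some row0 =>
        rw [hM] at h
        cases hA : (act_5 scale matrix s)[r]? with
        | none => rw [hA] at h; simp at h
        | some rowA =>
          rw [hA] at h
          congr 1
          apply List.ext_getElem?
          intro c
          have hcell : rowA[c]? = pvCell (act_5 scale matrix s) r c := by
            simp [pvCell, hA]
          rw [hcell, cellA_ge scale matrix s hs r c (by rw [← hrepdef]; omega)]
          simp [pvCell, hM]
  · have hB : act_5_alt scale matrix s = matrix := by
      unfold act_5_alt
      rw [← hrepdef, if_neg hg]
    rw [hB]
    rcases lt_or_gt_of_ne hs0 with hneg | hpos
    · exact act5_s_nonpos scale matrix s (le_of_lt hneg)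
    · exact act5_rep_nonpos scale matrix s (by omega)

-- ===== VERDICT (by name: the statement is the Claim_ definition above) =====
theorem act_5_spec : Claim_equal_act_5 := by
  intro scale matrix s_scale _hdom hpre
  unfold Spec_act_5
  exact main_eq scale matrix s_scale hpre.1 hpre.2
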